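-- pv_equiv track=rewrite | github.com/langou-1/GenshinLyrePlayer | tabs/build_song.py | parse_tab
-- ===== SOURCE A (Python) =====
-- KEYMAP = {
--     'Z': 48, 'X': 50, 'C': 52, 'V': 53, 'B': 55, 'N': 57, 'M': 59,
--     'A': 60, 'S': 62, 'D': 64, 'F': 65, 'G': 67, 'H': 69, 'J': 71,
--     'Q': 72, 'W': 74, 'E': 76, 'R': 77, 'T': 79, 'Y': 81, 'U': 83,
-- }
--
-- def parse_tab(text):
--     lines = text.splitlines()
--     tokens = []
--     prev_blank = True  # 开头不需要额外 rest
--     for raw in lines: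
--         line = raw.strip()
--         if not line:
--             if not prev_blank:
--                 tokens.append(None)      # 段落停顿 (1 个单位)
--                 tokens.append(None)
--             prev_blank = True
--             continue
--         if line.startswith('#'):
--             if not prev_blank:
--                 tokens.append(None)
--                 tokens.append(None)
--             prev_blank = True
--             continue
--         prev_blank = False
--
--         i = 0
--         while i < len(line):
--             ch = line[i]
--             if ch.isspace():
--                 i += 1
--                 continue
--             if ch == '(':
--                 j = line.find(')', i)
--                 if j < 0:
--                     # 未闭合括号，尽量容错
--                     j = len(line)
--                 chord = tuple(c for c in line[i+1:j].upper() if c in KEYMAP)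
--                 if chord:
--                     tokens.append(chord)
--                 i = j + 1
--             else:
--                 up = ch.upper()
--                 if up in KEYMAP:
--                     tokens.append((up,))
--                 # 其它字符直接忽略
--                 i += 1
--     return tokens
-- ===== SOURCE B (Python) =====
-- KEYMAP = {
--     'Z': 48, 'X': 50, 'C': 52, 'V': 53, 'B': 55, 'N': 57, 'M': 59,
--     'A': 60, 'S': 62, 'D': 64, 'F': 65, 'G': 67, 'H': 69, 'J': 71,
--     'Q': 72, 'W': 74, 'E': 76, 'R': 77, 'T': 79, 'Y': 81, 'U': 83,
-- }
--
-- def parse_tab(text):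
--     # Single-pass state machine per line: a chord buffer replaces A's
--     # index arithmetic and find() jumps.
--     tokens = []
--     prev_blank = True
--     for raw in text.splitlines():
--         line = raw.strip()
--         if not line or line.startswith('#'):
--             if not prev_blank:
--                 tokens.append(None)
--                 tokens.append(None)
--             prev_blank = True
--             continue
--         prev_blank = False
--         buf = None  # None = outside a chord; list = collecting a chord
--         for ch in line:
--             if buf is not None:
--                 if ch == ')':
--                     if buf:
--                         tokens.append(tuple(buf))
--                     buf = None
--                 else:
--                     up = ch.upper()
--                     if up in KEYMAP:
--                         buf.append(up)
--             elif ch == '(':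
--                 buf = []
--             elif not ch.isspace():
--                 up = ch.upper()
--                 if up in KEYMAP:
--                     tokens.append((up,))
--         if buf:  # unterminated chord, keep what we collected
--             tokens.append(tuple(buf))
--     return tokens
-- ===== Notes on version B (the rewrite author's own statement) =====
-- stated objective: alternative
-- what changed: the inner index-based while loop with find() jumps and slice-then-filter chord extraction is replaced by a single-pass character state machine that carries a chord buffer; the blank/comment branches are merged
import Mathlib
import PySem

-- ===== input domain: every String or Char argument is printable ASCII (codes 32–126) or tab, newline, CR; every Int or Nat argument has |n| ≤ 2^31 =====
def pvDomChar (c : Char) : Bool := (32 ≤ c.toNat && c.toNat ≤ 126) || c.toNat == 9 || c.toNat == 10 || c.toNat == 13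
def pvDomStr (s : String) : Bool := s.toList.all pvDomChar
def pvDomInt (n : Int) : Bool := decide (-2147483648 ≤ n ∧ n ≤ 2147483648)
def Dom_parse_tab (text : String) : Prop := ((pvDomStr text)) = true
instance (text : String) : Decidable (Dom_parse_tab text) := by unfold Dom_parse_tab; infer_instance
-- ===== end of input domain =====

-- B replaces A's index-based inner scanner (find() jumps + slicing) by a one-pass
-- character state machine with a chord buffer; same outer line loop. Objective: alternative.

-- keys of KEYMAP (only membership of the keys matters to parse_tab)
def pvKeys : List Char :=
  ['Z','X','C','V','B','N','M','A','S','D','F','G','H','J','Q','W','E','R','T','Y','U']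

def pvTok (cs : List Char) : Option (List String) := some (cs.map (fun c => String.ofList [c]))

-- ===== PORT A =====
-- A's local `j = line.find(')', i); if j < 0: j = len(line)` as a named helper
def pvJn (ln : List Char) (i : Nat) : Nat :=
  if PySem.Chars.findFrom ln [')'] (i : Int) < 0 then ln.length
  else (PySem.Chars.findFrom ln [')'] (i : Int)).toNat

-- A's `chord = tuple(c for c in line[i+1:j].upper() if c in KEYMAP)` (as chars)
def pvChordA (ln : List Char) (i : Nat) : List Char :=
  (PySem.Chars.upper (PySem.List.slice ln (some ((i : Int) + 1))
    (some ((pvJn ln i : Nat) : Int)))).filter (fun c => c ∈ pvKeys)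

-- used only by pvLoopA's termination proof: a found ')' lies at or after the start index
theorem pvFindFrom_ge (ln : List Char) (i : Nat) (hi : i ≤ ln.length)
    (h : ¬ PySem.Chars.findFrom ln [')'] (i : Int) < 0) :
    (i : Int) ≤ PySem.Chars.findFrom ln [')'] (i : Int) := by
  rw [PySem.Chars.findFrom_natCast ln [')'] i hi] at *
  split at h
  · omega
  · have := PySem.Chars.neg_one_le_find (List.drop i ln) [')']
    omega

theorem pvJn_bound (ln : List Char) (i : Nat) (hi : i < ln.length) :
    ln.length - (pvJn ln i + 1) < ln.length - i := by
  unfold pvJn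
  split
  · omega
  · rename_i hneg
    have h1 := pvFindFrom_ge ln i (le_of_lt hi) hneg
    omega

-- A's inner while loop, step for step (i the scan index)
def pvLoopA (ln : List Char) (i : Nat) (toks : List (Option (List String))) :
    List (Option (List String)) :=
  if h : i < ln.length then
    if PySem.Chars.isspace ln[i] then pvLoopA ln (i + 1) toks
    else if ln[i] = '(' then
      pvLoopA ln (pvJn ln i + 1)
        (if pvChordA ln i = [] then toks else toks ++ [pvTok (pvChordA ln i)])
    else
      if PySem.Chars.upperChar ln[i] ∈ pvKeys then
        pvLoopA ln (i + 1) (toks ++ [pvTok [PySem.Chars.upperChar ln[i]]])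
      else pvLoopA ln (i + 1) toks
  else toks
termination_by ln.length - i
decreasing_by
  · omega
  · exact pvJn_bound ln i h
  · omega
  · omega

def parse_tab (text : String) : List (Option (List String)) :=
  (PySem.Chars.splitlines text.toList |>.foldl
    (fun (st : List (Option (List String)) × Bool) raw =>
      let toks := st.1
      let prev_blank := st.2
      let ln := PySem.Chars.strip raw
      if ln = [] then
        (if prev_blank then toks else toks ++ [none, none], true)
      else if PySem.Chars.startswith ln ['#'] then
        (if prev_blank then toks else toks ++ [none, none], true)
      else
        (pvLoopA ln 0 toks, false))
    ([], true)).1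

-- ===== PORT B =====
-- B's inner for loop: buf = none outside a chord, some acc while collecting one;
-- the trailing "if buf:" flush is the [] case with buf = some acc
def pvScanB (ln : List Char) (buf : Option (List Char))
    (toks : List (Option (List String))) : List (Option (List String)) :=
  match ln, buf with
  | [], some acc => if acc = [] then toks else toks ++ [pvTok acc]
  | [], none => toks
  | c :: rest, some acc =>
    if c = ')' then pvScanB rest none (if acc = [] then toks else toks ++ [pvTok acc])
    else pvScanB rest
      (some (if PySem.Chars.upperChar c ∈ pvKeys then acc ++ [PySem.Chars.upperChar c] else acc))
      toks
  | c :: rest, none =>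
    if c = '(' then pvScanB rest (some []) toks
    else if PySem.Chars.isspace c then pvScanB rest none toks
    else if PySem.Chars.upperChar c ∈ pvKeys then
      pvScanB rest none (toks ++ [pvTok [PySem.Chars.upperChar c]])
    else pvScanB rest none toks

def parse_tab_alt (text : String) : List (Option (List String)) :=
  (PySem.Chars.splitlines text.toList |>.foldl
    (fun (st : List (Option (List String)) × Bool) raw =>
      let toks := st.1
      let prev_blank := st.2
      let ln := PySem.Chars.strip raw
      if ln = [] ∨ PySem.Chars.startswith ln ['#'] = true then
        (if prev_blank then toks else toks ++ [none, none], true)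
      else
        (pvScanB ln none toks, false))
    ([], true)).1

-- ===== PRECONDITION & SPEC =====
def Spec_parse_tab (text : String) (out : List (Option (List String))) : Prop := out = parse_tab_alt text
instance (text : String) (out : List (Option (List String))) : Decidable (Spec_parse_tab text out) := by unfold Spec_parse_tab; infer_instance

-- ===== CLAIM (what is proved, stated in full; the proofs are below) =====
def Claim_equal_parse_tab : Prop := ∀ (text : String), Dom_parse_tab text → Spec_parse_tab text (parse_tab text)

-- ===== LEMMAS AND PROOFS =====

-- upper-then-filter of a char list; also what B's chord buffer accumulates
def pvKf (l : List Char) : List Char := (l.map PySem.Chars.upperChar).filter (fun c => c ∈ pvKeys)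

theorem pvKf_cons (c : Char) (l : List Char) :
    pvKf (c :: l) = (if PySem.Chars.upperChar c ∈ pvKeys
      then [PySem.Chars.upperChar c] else []) ++ pvKf l := by
  simp [pvKf, List.filter]
  split <;> simp_all

-- B in chord mode, no ')' ahead: flush at end of line
theorem pvScanB_chord_no_close (rest : List Char) (acc : List Char)
    (toks : List (Option (List String))) (h : ')' ∉ rest) :
    pvScanB rest (some acc) toks =
      (if acc ++ pvKf rest = [] then toks else toks ++ [pvTok (acc ++ pvKf rest)]) := by
  induction rest generalizing acc with
  | nil => simp [pvScanB, pvKf]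
  | cons c r ih =>
    have hc : c ≠ ')' := by intro hc; exact h (hc ▸ List.mem_cons_self)
    have hr : ')' ∉ r := fun hm => h (List.mem_cons_of_mem _ hm)
    rw [pvScanB, if_neg hc, ih _ hr, pvKf_cons]
    split <;> simp

-- B in chord mode, first ')' right after pre: emit and leave chord mode
theorem pvScanB_chord_close (pre suf : List Char) (acc : List Char)
    (toks : List (Option (List String))) (h : ')' ∉ pre) :
    pvScanB (pre ++ ')' :: suf) (some acc) toks =
      pvScanB suf none
        (if acc ++ pvKf pre = [] then toks else toks ++ [pvTok (acc ++ pvKf pre)]) := by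
  induction pre generalizing acc with
  | nil => simp [pvScanB, pvKf]
  | cons c r ih =>
    have hc : c ≠ ')' := by intro hc; exact h (hc ▸ List.mem_cons_self)
    have hr : ')' ∉ r := fun hm => h (List.mem_cons_of_mem _ hm)
    rw [List.cons_append, pvScanB, if_neg hc, ih _ hr, pvKf_cons]
    split <;> simp

-- find of a single char: -1 when absent
theorem pvFind_none (l : List Char) (h : ')' ∉ l) : PySem.Chars.find l [')'] = -1 := by
  rw [PySem.Chars.find_eq_neg_one_iff]
  intro hinf
  exact h (hinf.sublist.subset (List.mem_singleton_self _))

-- find of a single char: index of the first occurrence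
theorem pvFind_split (pre suf : List Char) (h : ')' ∉ pre) :
    PySem.Chars.find (pre ++ ')' :: suf) [')'] = (pre.length : Int) := by
  set s := pre ++ ')' :: suf with hs
  have hmem : [')'] <:+: s := ⟨pre, suf, by simp [hs]⟩
  have hF : 0 ≤ PySem.Chars.find s [')'] := (PySem.Chars.find_nonneg_iff s [')']).mpr hmem
  obtain ⟨hpref, hmin⟩ := PySem.Chars.find_spec hF
  have hat : [')'] <+: s.drop pre.length := by
    rw [hs, List.drop_left]
    exact ⟨suf, rfl⟩
  have hle : (PySem.Chars.find s [')']).toNat ≤ pre.length := by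
    by_contra hlt
    exact hmin pre.length (by omega) hat
  have hge : ¬ (PySem.Chars.find s [')']).toNat < pre.length := by
    intro hlt
    set k := (PySem.Chars.find s [')']).toNat with hk
    obtain ⟨t, ht⟩ := hpref
    rw [hs, List.drop_append_of_le_length (le_of_lt hlt),
      List.drop_eq_getElem_cons hlt, List.singleton_append, List.cons_append] at ht
    have h1 : ')' = pre[k] := by injection ht
    exact h (h1 ▸ List.getElem_mem hlt)
  omega

-- the central equivalence of the two inner loops
theorem pvLoop_eq_scan (n : Nat) (ln : List Char) (i : Nat)
    (toks : List (Option (List String))) (hn : ln.length - i ≤ n) :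
    pvLoopA ln i toks = pvScanB (ln.drop i) none toks := by
  induction n generalizing i toks with
  | zero =>
    have hi : ln.length ≤ i := by omega
    rw [pvLoopA, dif_neg (by omega), List.drop_eq_nil_of_le hi, pvScanB]
  | succ n ih =>
    by_cases h : i < ln.length
    · have hdrop : ln.drop i = ln[i] :: ln.drop (i + 1) := List.drop_eq_getElem_cons h
      rw [pvLoopA, dif_pos h, hdrop]
      by_cases hsp : PySem.Chars.isspace ln[i]
      · have hpar : ln[i] ≠ '(' := by
          intro hc; rw [hc] at hsp; exact absurd hsp (by decide)
        rw [if_pos hsp, pvScanB, if_neg hpar, if_pos hsp]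
        exact ih (i + 1) toks (by omega)
      · rw [if_neg hsp]
        by_cases hpar : ln[i] = '('
        · rw [if_pos hpar, pvScanB, if_pos hpar]
          have hi1 : i ≤ ln.length := le_of_lt h
          by_cases hm : ')' ∈ ln.drop (i + 1)
          · -- split the tail at the first ')'
            obtain ⟨k, hk⟩ := Option.isSome_iff_exists.mp
              ((PySem.List.index?_isSome_iff (ln.drop (i + 1)) ')').mpr hm)
            obtain ⟨pre, suf, hsplit, hlen, hpre⟩ :=
              (PySem.List.index?_eq_some_iff (ln.drop (i + 1)) ')' k).mp hk
            have hfind : PySem.Chars.findFrom ln [')'] (i : Int) =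
                (i : Int) + ((pre.length + 1 : Nat) : Int) := by
              rw [PySem.Chars.findFrom_natCast ln [')'] i hi1]
              have h2 := pvFind_split ('(' :: pre) suf
                (by simp [List.mem_cons]; exact fun hc => hpre hc)
              rw [List.cons_append] at h2
              have h3 : PySem.Chars.find (ln.drop i) [')'] = ((pre.length + 1 : Nat) : Int) := by
                rw [hdrop, hpar, hsplit]
                simpa using h2
              rw [h3, if_neg (by push_cast; omega)]
            have hjn : pvJn ln i = i + pre.length + 1 := by
              unfold pvJn
              rw [hfind, if_neg (by push_cast; omega)]
              push_cast
              omega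
            have hchord : pvChordA ln i = pvKf pre := by
              unfold pvChordA
              rw [hjn, PySem.List.slice_toNat ln (by omega) (by positivity)]
              have h1 : ((i : Int) + 1).toNat = i + 1 := by omega
              have h2 : (((i + pre.length + 1 : Nat) : Int)).toNat = i + pre.length + 1 := by
                omega
              rw [h1, h2, hsplit]
              have h3 : i + pre.length + 1 - (i + 1) = pre.length := by omega
              rw [h3, List.take_left]
              rfl
            have hdrop2 : ln.drop (i + pre.length + 1 + 1) = suf := by
              have h4 : ln.drop (i + pre.length + 1 + 1) =
                  (ln.drop (i + 1)).drop (pre.length + 1) := by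
                rw [List.drop_drop]; ring_nf
              rw [h4, hsplit, show pre.length + 1 = (pre ++ [')']).length by simp,
                  show pre ++ ')' :: suf = (pre ++ [')']) ++ suf by simp, List.drop_left]
            rw [hjn, hchord, ih (i + pre.length + 1 + 1) _ (by omega), hdrop2, hsplit,
              pvScanB_chord_close pre suf [] _ hpre]
            simp
          · -- no closing paren: chord runs to end of line
            have hfind : PySem.Chars.findFrom ln [')'] (i : Int) = -1 := by
              rw [PySem.Chars.findFrom_natCast ln [')'] i hi1]
              have h3 : PySem.Chars.find (ln.drop i) [')'] = -1 := by
                rw [hdrop, hpar]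
                exact pvFind_none _ (by simp [List.mem_cons]; exact fun hc => hm hc)
              rw [h3, if_pos rfl]
            have hjn : pvJn ln i = ln.length := by
              unfold pvJn
              rw [hfind, if_pos (by norm_num)]
            have hchord : pvChordA ln i = pvKf (ln.drop (i + 1)) := by
              unfold pvChordA
              rw [hjn, PySem.List.slice_toNat ln (by omega) (by positivity)]
              have h1 : ((i : Int) + 1).toNat = i + 1 := by omega
              have h2 : (((ln.length : Nat) : Int)).toNat = ln.length := by omega
              rw [h1, h2, List.take_of_length_le (by simp)]
              rfl
            rw [hjn, hchord, ih (ln.length + 1) _ (by omega),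
              List.drop_eq_nil_of_le (by omega), pvScanB,
              pvScanB_chord_no_close _ [] _ hm]
            simp
        · rw [if_neg hpar, pvScanB, if_neg hpar, if_neg hsp]
          by_cases hkey : PySem.Chars.upperChar ln[i] ∈ pvKeys
          · rw [if_pos hkey, if_pos hkey]
            exact ih (i + 1) _ (by omega)
          · rw [if_neg hkey, if_neg hkey]
            exact ih (i + 1) _ (by omega)
    · rw [pvLoopA, dif_neg h, List.drop_eq_nil_of_le (by omega), pvScanB]

-- the two per-line step functions agree
theorem pvStep_eq (st : List (Option (List String)) × Bool) (raw : List Char) :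
    (let toks := st.1
     let prev_blank := st.2
     let ln := PySem.Chars.strip raw
     if ln = [] then
       (if prev_blank then toks else toks ++ [none, none], true)
     else if PySem.Chars.startswith ln ['#'] then
       (if prev_blank then toks else toks ++ [none, none], true)
     else
       (pvLoopA ln 0 toks, false)) =
    (let toks := st.1
     let prev_blank := st.2
     let ln := PySem.Chars.strip raw
     if ln = [] ∨ PySem.Chars.startswith ln ['#'] = true then
       (if prev_blank then toks else toks ++ [none, none], true)
     else
       (pvScanB ln none toks, false)) := by
  by_cases h1 : PySem.Chars.strip raw = []
  · simp [h1]
  · by_cases h2 : PySem.Chars.startswith (PySem.Chars.strip raw) ['#'] = true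
    · simp [h1, h2]
    · simp only [if_neg h1, if_neg h2, if_neg (by tauto : ¬ (PySem.Chars.strip raw = [] ∨
        PySem.Chars.startswith (PySem.Chars.strip raw) ['#'] = true))]
      rw [pvLoop_eq_scan (PySem.Chars.strip raw).length _ 0 _ (by omega)]
      rfl

-- ===== VERDICT (by name: the statement is the Claim_ definition above) =====
theorem parse_tab_spec : Claim_equal_parse_tab := by
  intro text _
  unfold Spec_parse_tab parse_tab parse_tab_alt
  congr 2
  funext st raw
  exact pvStep_eq st raw
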